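-- pv_equiv track=rewrite | github.com/Zhang-Liao/ilp_coq | stats/stat_ilp_pred.py | stat_one_pred
-- ===== SOURCE A (Python) =====
-- def stat_one_pred(stats, good, label):
--     for tac in good:
--         if tac not in stats.keys():
--             stats[tac] = {"num": 1, "TP": 0, "FP": 0, "FN": 0}
--         else:
--             stats[tac]["num"] += 1
--         if tac == label:
--             stats[tac]["TP"] += 1
--         else:
--             stats[tac]["FP"] += 1
--     if label not in good:
--         stats[label]["FN"] += 1
--
--     return stats
-- ===== SOURCE B (Python) =====
-- def _apply(stats, tac, c, label):
--     if tac not in stats: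
--         stats[tac] = {"num": c, "TP": 0, "FP": 0, "FN": 0}
--     else:
--         stats[tac]["num"] += c
--     key = "TP" if tac == label else "FP"
--     stats[tac][key] += c
--
--
-- def stat_one_pred(stats, good, label):
--     counts = {}
--     for t in good:
--         counts[t] = counts.get(t, 0) + 1
--     for tac, c in counts.items():
--         _apply(stats, tac, c, label)
--     if label not in counts:
--         stats[label]["FN"] += 1
--     return stats
-- ===== Notes on version B (the rewrite author's own statement) =====
-- stated objective: alternative
-- what changed: B first aggregates good into a counts table (first-occurrence order) and then performs one combined num/TP/FP update with the whole count per DISTINCT tactic, instead of A's per-element pass over good.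
import Mathlib
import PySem

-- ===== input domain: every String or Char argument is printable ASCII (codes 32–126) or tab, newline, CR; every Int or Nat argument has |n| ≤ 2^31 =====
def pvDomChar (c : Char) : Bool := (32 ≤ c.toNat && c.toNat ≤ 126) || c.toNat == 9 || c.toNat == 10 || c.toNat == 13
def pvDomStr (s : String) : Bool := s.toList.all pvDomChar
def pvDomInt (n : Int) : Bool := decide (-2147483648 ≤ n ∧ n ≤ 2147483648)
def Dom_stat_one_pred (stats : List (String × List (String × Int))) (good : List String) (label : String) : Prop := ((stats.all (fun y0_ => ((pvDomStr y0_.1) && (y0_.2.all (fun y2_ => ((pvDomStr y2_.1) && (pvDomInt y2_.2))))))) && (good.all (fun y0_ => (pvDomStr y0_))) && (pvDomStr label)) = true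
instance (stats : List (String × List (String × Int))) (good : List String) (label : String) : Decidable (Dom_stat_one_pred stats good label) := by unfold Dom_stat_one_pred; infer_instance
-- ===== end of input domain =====

-- B replaces A's per-element pass over `good` by a counts table (first-occurrence order) and one
-- combined update per distinct tactic; both Pythons mutate `stats` in place the same way, the
-- equivalence proved here is about the returned dict (which is that same object).

-- ===== PORT A =====
-- Python A mutates the dict `stats`; the port threads the dict value.  Where Python raises
-- KeyError (missing "num"/"TP"/"FP"/"FN" key, or `stats[label]` absent) the port's
-- `Dict.modify` inserts the key instead; exactly those inputs are excluded by Pre_ below.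
def stat_one_pred (stats : List (String × List (String × Int))) (good : List String) (label : String) : List (String × List (String × Int)) :=
  let st0 : PySem.Dict String (PySem.Dict String Int) :=
    PySem.Dict.ofList (stats.map (fun p => (p.1, PySem.Dict.ofList p.2)))
  let st1 := good.foldl (fun st tac =>
    let st := if st.contains tac then
        st.modify tac PySem.Dict.empty (fun inner => inner.modify "num" 0 (· + 1))
      else
        st.insert tac (PySem.Dict.ofList [("num", 1), ("TP", 0), ("FP", 0), ("FN", 0)])
    if tac == label then
      st.modify tac PySem.Dict.empty (fun inner => inner.modify "TP" 0 (· + 1))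
    else
      st.modify tac PySem.Dict.empty (fun inner => inner.modify "FP" 0 (· + 1))) st0
  let st2 := if good.contains label then st1
    else st1.modify label PySem.Dict.empty (fun inner => inner.modify "FN" 0 (· + 1))
  st2.items.map (fun p => (p.1, p.2.items))

-- ===== PORT B =====
-- port of Source B's helper `_apply`
def pvApply (st : PySem.Dict String (PySem.Dict String Int)) (tac : String) (c : Int) (label : String) : PySem.Dict String (PySem.Dict String Int) :=
  let st := if st.contains tac then
      st.modify tac PySem.Dict.empty (fun inner => inner.modify "num" 0 (· + c))
    else
      st.insert tac (PySem.Dict.ofList [("num", c), ("TP", 0), ("FP", 0), ("FN", 0)])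
  let key := if tac == label then "TP" else "FP"
  st.modify tac PySem.Dict.empty (fun inner => inner.modify key 0 (· + c))

def stat_one_pred_alt (stats : List (String × List (String × Int))) (good : List String) (label : String) : List (String × List (String × Int)) :=
  let st0 : PySem.Dict String (PySem.Dict String Int) :=
    PySem.Dict.ofList (stats.map (fun p => (p.1, PySem.Dict.ofList p.2)))
  let counts : PySem.Dict String Int :=
    good.foldl (fun c t => c.insert t (c.getD t 0 + 1)) PySem.Dict.empty
  let st1 := counts.items.foldl (fun st p => pvApply st p.1 p.2 label) st0
  let st2 := if counts.contains label then st1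
    else st1.modify label PySem.Dict.empty (fun inner => inner.modify "FN" 0 (· + 1))
  st2.items.map (fun p => (p.1, p.2.items))

-- ===== PRECONDITION & SPEC =====
-- Pre_ excludes exactly the inputs where the Python raises KeyError: a tactic of `good` already in
-- `stats` whose record lacks the accessed "num"/"TP"/"FP" key, or (when label ∉ good) a label
-- absent from `stats` or whose record lacks "FN".  Both A and B raise there.
def pvPreB (stats : List (String × List (String × Int))) (good : List String) (label : String) : Bool :=
  let d0 : PySem.Dict String (PySem.Dict String Int) :=
    PySem.Dict.ofList (stats.map (fun p => (p.1, PySem.Dict.ofList p.2)))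
  (good.all (fun tac =>
    match d0.get? tac with
    | none => true
    | some inner =>
        inner.contains "num" && (if tac == label then inner.contains "TP" else inner.contains "FP")))
  && (good.contains label ||
    (match d0.get? label with
     | none => false
     | some inner => inner.contains "FN"))

def Pre_stat_one_pred (stats : List (String × List (String × Int))) (good : List String) (label : String) : Prop :=
  pvPreB stats good label = true
instance (stats : List (String × List (String × Int))) (good : List String) (label : String) : Decidable (Pre_stat_one_pred stats good label) := by unfold Pre_stat_one_pred; infer_instance

def pvWitness_stat_one_pred : (List (String × List (String × Int))) × List String × String :=
  ([("x", [("num", 2), ("TP", 0), ("FP", 1), ("FN", 0)])], ["x", "y"], "x")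

def Spec_stat_one_pred (stats : List (String × List (String × Int))) (good : List String) (label : String) (out : List (String × List (String × Int))) : Prop := out = stat_one_pred_alt stats good label
instance (stats : List (String × List (String × Int))) (good : List String) (label : String) (out : List (String × List (String × Int))) : Decidable (Spec_stat_one_pred stats good label out) := by unfold Spec_stat_one_pred; infer_instance

-- ===== CLAIM (what is proved, stated in full; the proofs are below) =====
def Claim_equal_stat_one_pred : Prop := ∀ (stats : List (String × List (String × Int))) (good : List String) (label : String), Dom_stat_one_pred stats good label → Pre_stat_one_pred stats good label → Spec_stat_one_pred stats good label (stat_one_pred stats good label)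

-- ===== LEMMAS AND PROOFS =====

theorem pv_witness_ok : Dom_stat_one_pred (pvWitness_stat_one_pred.1) (pvWitness_stat_one_pred.2.1) (pvWitness_stat_one_pred.2.2) ∧ Pre_stat_one_pred (pvWitness_stat_one_pred.1) (pvWitness_stat_one_pred.2.1) (pvWitness_stat_one_pred.2.2) := by
  constructor <;> decide

-- two modifies at the same key fuse
theorem pv_modify_modify_self {κ ν : Type} [BEq κ] [LawfulBEq κ] (d : PySem.Dict κ ν) (k : κ)
    (d0 : ν) (f g : ν → ν) :
    (d.modify k d0 f).modify k d0 g = d.modify k d0 (fun v => g (f v)) := by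
  simp [PySem.Dict.modify, PySem.Dict.getD_eq_get?_getD, PySem.Dict.get?_insert_self,
    PySem.Dict.insert_insert_self]

-- two inserts commute when the first key is already present
theorem pv_insert_insert_comm {κ ν : Type} [BEq κ] [LawfulBEq κ] (d : PySem.Dict κ ν) (k k' : κ)
    (v w : ν) (hk : d.contains k = true) (hne : k ≠ k') :
    (d.insert k v).insert k' w = (d.insert k' w).insert k v := by
  apply PySem.Dict.ext
  by_cases hc' : d.contains k' = true
  · rw [PySem.Dict.items_insert_of_contains _ w (by simp [PySem.Dict.contains_insert, hc']),
      PySem.Dict.items_insert_of_contains _ v hk,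
      PySem.Dict.items_insert_of_contains _ v (by simp [PySem.Dict.contains_insert, hk]),
      PySem.Dict.items_insert_of_contains _ w hc']
    simp only [List.map_map]
    apply List.map_congr_left
    intro p _
    by_cases h1 : p.1 = k <;> by_cases h2 : p.1 = k' <;>
      simp_all [Function.comp, Ne.symm hne]
  · have h1 : (d.insert k v).contains k' = false := by
      simp [PySem.Dict.contains_insert, hc', Ne.symm hne]
    have h2 : (d.insert k' w).contains k = true := by
      simp [PySem.Dict.contains_insert, hk]
    rw [PySem.Dict.items_insert_of_not_contains _ w h1,
      PySem.Dict.items_insert_of_contains _ v hk,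
      PySem.Dict.items_insert_of_contains _ v h2,
      PySem.Dict.items_insert_of_not_contains _ w (by simpa using hc')]
    simp [Ne.symm hne]

-- a modify at a PRESENT key commutes with a modify at any other key
theorem pv_modify_comm {κ ν : Type} [BEq κ] [LawfulBEq κ] (d : PySem.Dict κ ν) (k k' : κ)
    (d0 d0' : ν) (f g : ν → ν) (hk : d.contains k = true) (hne : k ≠ k') :
    (d.modify k d0 f).modify k' d0' g = (d.modify k' d0' g).modify k d0 f := by
  simp only [PySem.Dict.modify, PySem.Dict.getD_insert_of_ne _ _ _ hne,
    PySem.Dict.getD_insert_of_ne _ _ _ (Ne.symm hne)]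
  exact pv_insert_insert_comm d k k' _ _ hk hne

theorem pv_contains_pvApply (st : PySem.Dict String (PySem.Dict String Int)) (u t : String)
    (c : Int) (label : String) :
    (pvApply st u c label).contains t = (t == u || st.contains t) := by
  unfold pvApply
  by_cases h : st.contains u = true <;>
    simp [h, PySem.Dict.contains_modify, PySem.Dict.contains_insert]

-- modify right after inserting the same key rewrites the inserted value
theorem pv_modify_insert_self {κ ν : Type} [BEq κ] [LawfulBEq κ] (d : PySem.Dict κ ν) (k : κ)
    (v d0 : ν) (f : ν → ν) : (d.insert k v).modify k d0 f = d.insert k (f v) := by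
  simp [PySem.Dict.modify, PySem.Dict.getD_eq_get?_getD, PySem.Dict.get?_insert_self,
    PySem.Dict.insert_insert_self]

-- interleaved per-count bumps at two distinct keys fuse into one combined bump
theorem pv_inner_merge (v : PySem.Dict String Int) (k1 k2 : String) (hne : k1 ≠ k2) (a b : Int) :
    (((v.modify k1 0 (· + a)).modify k2 0 (· + a)).modify k1 0 (· + b)).modify k2 0 (· + b)
      = (v.modify k1 0 (· + (a + b))).modify k2 0 (· + (a + b)) := by
  have h1 : (v.modify k1 0 (· + a)).contains k1 = true := by
    simp [PySem.Dict.contains_modify]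
  rw [← pv_modify_comm (v.modify k1 0 (· + a)) k1 k2 0 0 _ _ h1 hne,
    pv_modify_modify_self, pv_modify_modify_self]
  have e1 : (fun x => x + a + b) = (fun x : Int => x + (a + b)) := by funext x; omega
  simp only [e1]

theorem pv_apply_merge (st : PySem.Dict String (PySem.Dict String Int)) (t : String) (a b : Int)
    (label : String) :
    pvApply (pvApply st t a label) t b label = pvApply st t (a + b) label := by
  unfold pvApply
  have hkey : ("num" : String) ≠ (if t == label then "TP" else "FP") := by
    by_cases h : t == label <;> simp [h]
  by_cases hc : st.contains t = true
  · simp only [hc, if_true, PySem.Dict.contains_modify, BEq.rfl, Bool.true_or]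
    rw [pv_modify_modify_self, pv_modify_modify_self, pv_modify_modify_self,
      pv_modify_modify_self]
    congr 1
    funext i
    exact pv_inner_merge i "num" _ hkey a b
  · simp only [hc, if_false, Bool.false_eq_true, PySem.Dict.contains_modify,
      PySem.Dict.contains_insert, BEq.rfl, Bool.true_or, if_true]
    rw [pv_modify_insert_self, pv_modify_insert_self, pv_modify_insert_self,
      pv_modify_insert_self]
    congr 1
    by_cases h : t == label <;>
      simp [h, PySem.Dict.modify, PySem.Dict.insert, PySem.Dict.contains, PySem.Dict.getD,
        PySem.Dict.get?, PySem.Dict.ofList, PySem.Dict.update, PySem.Dict.empty]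

-- pvApply under a known contains test, fused into one dict operation
theorem pv_apply_of_contains (st : PySem.Dict String (PySem.Dict String Int)) (tac : String)
    (c : Int) (label : String) (h : st.contains tac = true) :
    pvApply st tac c label
      = st.modify tac PySem.Dict.empty
          (fun i => (i.modify "num" 0 (· + c)).modify (if tac == label then "TP" else "FP") 0 (· + c)) := by
  unfold pvApply
  simp only [h, if_true]
  rw [pv_modify_modify_self]

theorem pv_apply_of_not_contains (st : PySem.Dict String (PySem.Dict String Int)) (tac : String)
    (c : Int) (label : String) (h : st.contains tac = false) :
    pvApply st tac c label
      = st.insert tac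
          ((PySem.Dict.ofList [("num", c), ("TP", 0), ("FP", 0), ("FN", 0)]).modify
            (if tac == label then "TP" else "FP") 0 (· + c)) := by
  unfold pvApply
  simp only [h, Bool.false_eq_true, if_false]
  rw [pv_modify_insert_self]

-- an insert of a fresh key commutes with a modify at a present key
theorem pv_insert_modify_comm {κ ν : Type} [BEq κ] [LawfulBEq κ] (d : PySem.Dict κ ν) (k u : κ)
    (d0 : ν) (f : ν → ν) (w : ν) (hk : d.contains k = true) (hne : k ≠ u) :
    (d.modify k d0 f).insert u w = (d.insert u w).modify k d0 f := by
  simp only [PySem.Dict.modify, PySem.Dict.getD_insert_of_ne _ _ _ hne]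
  exact pv_insert_insert_comm d k u _ _ hk hne

theorem pv_apply_comm (st : PySem.Dict String (PySem.Dict String Int)) (t u : String)
    (c c' : Int) (label : String) (h : st.contains t = true) (hne : u ≠ t) :
    pvApply (pvApply st t c label) u c' label = pvApply (pvApply st u c' label) t c label := by
  have hct : ∀ (x : PySem.Dict String (PySem.Dict String Int)) (v : String) (cc : Int),
      x.contains t = true → (pvApply x v cc label).contains t = true := by
    intro x v cc hx
    rw [pv_contains_pvApply, hx, Bool.or_true]
  by_cases hu : st.contains u = true
  · rw [pv_apply_of_contains st t c label h, pv_apply_of_contains st u c' label hu,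
      pv_apply_of_contains _ u c' label (by rw [PySem.Dict.contains_modify]; simp [hu]),
      pv_apply_of_contains _ t c label (by rw [PySem.Dict.contains_modify]; simp [h])]
    exact pv_modify_comm st t u _ _ _ _ h (Ne.symm hne)
  · have hu' : st.contains u = false := by simpa using hu
    rw [pv_apply_of_contains st t c label h]
    rw [pv_apply_of_not_contains _ u c' label
        (by rw [PySem.Dict.contains_modify]; simp [hu', hne]),
      pv_apply_of_not_contains st u c' label hu',
      pv_apply_of_contains _ t c label (by rw [PySem.Dict.contains_insert]; simp [h])]
    exact pv_insert_modify_comm st t u _ _ _ h (Ne.symm hne)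

-- move one pvApply at t past a list of pvApplys at other keys
theorem pv_foldl_comm (l : List (String × Int)) (st : PySem.Dict String (PySem.Dict String Int))
    (t : String) (c : Int) (label : String) (h : st.contains t = true)
    (hl : ∀ p ∈ l, p.1 ≠ t) :
    l.foldl (fun st p => pvApply st p.1 p.2 label) (pvApply st t c label)
      = pvApply (l.foldl (fun st p => pvApply st p.1 p.2 label) st) t c label := by
  induction l generalizing st with
  | nil => rfl
  | cons p rest ih =>
    simp only [List.foldl_cons]
    rw [pv_apply_comm st t p.1 c p.2 label h (hl p (by simp))]
    exact ih (pvApply st p.1 p.2 label)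
      (by rw [pv_contains_pvApply, h, Bool.or_true]) (fun q hq => hl q (by simp [hq]))

-- bumping the count of (t, n) inside the item list = one extra pvApply at t afterwards
theorem pv_pull (l : List (String × Int)) (st : PySem.Dict String (PySem.Dict String Int))
    (t : String) (n : Int) (label : String) (hnd : (l.map (·.1)).Nodup) (hmem : (t, n) ∈ l) :
    (l.map (fun p => if p.1 == t then (t, n + 1) else p)).foldl
        (fun st p => pvApply st p.1 p.2 label) st
      = pvApply (l.foldl (fun st p => pvApply st p.1 p.2 label) st) t 1 label := by
  induction l generalizing st with
  | nil => simp at hmem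
  | cons p rest ih =>
    simp only [List.map_cons] at hnd ⊢
    rw [List.nodup_cons] at hnd
    by_cases hpt : p.1 = t
    · have hnotin : t ∉ rest.map (·.1) := by rw [← hpt]; exact hnd.1
      have hp : p = (t, n) := by
        rcases List.mem_cons.mp hmem with h | h
        · exact h.symm
        · exact absurd (List.mem_map.mpr ⟨(t, n), h, rfl⟩) hnotin
      subst hp
      simp only [List.foldl_cons, BEq.rfl, if_true]
      have hrest : ∀ q ∈ rest, q.1 ≠ t := by
        intro q hq hqt
        exact hnotin (List.mem_map.mpr ⟨q, hq, hqt⟩)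
      have hmap : rest.map (fun p => if p.1 == t then (t, n + 1) else p) = rest := by
        rw [List.map_congr_left (g := id) (fun q hq => by simp [hrest q hq]), List.map_id]
      rw [hmap, ← pv_apply_merge st t n 1 label]
      exact pv_foldl_comm rest (pvApply st t n label) t 1 label
        (by rw [pv_contains_pvApply]; simp) hrest
    · have hmem' : (t, n) ∈ rest := by
        rcases List.mem_cons.mp hmem with h | h
        · exact absurd (by rw [← h]) hpt
        · exact h
      have hne' : (p.1 == t) = false := by simp [hpt]
      simp only [List.foldl_cons, hne', Bool.false_eq_true, if_false]
      exact ih (pvApply st p.1 p.2 label) hnd.2 hmem' 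

-- grouped processing of the counter equals the per-element pass
theorem pv_grouped (good : List String) (c : PySem.Dict String Int)
    (st : PySem.Dict String (PySem.Dict String Int)) (label : String) (hnd : c.keys.Nodup) :
    ((good.foldl (fun c t => c.insert t (c.getD t 0 + 1)) c).items).foldl
        (fun st p => pvApply st p.1 p.2 label) st
      = good.foldl (fun st tac => pvApply st tac 1 label)
          (c.items.foldl (fun st p => pvApply st p.1 p.2 label) st) := by
  induction good generalizing c st with
  | nil => rfl
  | cons g rest ih =>
    simp only [List.foldl_cons]
    rw [ih (c.insert g (c.getD g 0 + 1)) st (PySem.Dict.nodup_keys_insert c g _ hnd)]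
    congr 1
    by_cases hg : c.contains g = true
    · obtain ⟨v, hv⟩ : ∃ v, c.get? g = some v := by
        rw [PySem.Dict.contains_eq_isSome_get?] at hg
        exact Option.isSome_iff_exists.mp hg
      have hval : c.getD g 0 = v := by rw [PySem.Dict.getD_eq_get?_getD, hv]; rfl
      have hmem : (g, v) ∈ c.items :=
        (PySem.Dict.get?_eq_some_iff_mem_items c g v hnd).mp hv
      rw [PySem.Dict.items_insert_of_contains _ _ hg, hval]
      exact pv_pull c.items st g v label (by simpa [PySem.Dict.keys] using hnd) hmem
    · have hg' : c.contains g = false := by simpa using hg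
      rw [PySem.Dict.items_insert_of_not_contains _ _ hg',
        PySem.Dict.getD_of_not_contains _ _ hg', List.foldl_append]
      norm_num

-- A's loop body is pvApply with count 1
theorem pv_stepA (st : PySem.Dict String (PySem.Dict String Int)) (tac label : String) :
    (if tac == label then
      (if st.contains tac then
          st.modify tac PySem.Dict.empty (fun inner => inner.modify "num" 0 (· + 1))
        else st.insert tac (PySem.Dict.ofList [("num", 1), ("TP", 0), ("FP", 0), ("FN", 0)])).modify
        tac PySem.Dict.empty (fun inner => inner.modify "TP" 0 (· + 1))
    else
      (if st.contains tac then
          st.modify tac PySem.Dict.empty (fun inner => inner.modify "num" 0 (· + 1))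
        else st.insert tac (PySem.Dict.ofList [("num", 1), ("TP", 0), ("FP", 0), ("FN", 0)])).modify
        tac PySem.Dict.empty (fun inner => inner.modify "FP" 0 (· + 1)))
    = pvApply st tac 1 label := by
  unfold pvApply
  by_cases h : tac == label <;> simp [h]

theorem pv_main (stats : List (String × List (String × Int))) (good : List String)
    (label : String) : stat_one_pred stats good label = stat_one_pred_alt stats good label := by
  simp only [stat_one_pred, stat_one_pred_alt]
  rw [pv_grouped good PySem.Dict.empty _ label PySem.Dict.nodup_keys_empty]
  simp only [pv_stepA, PySem.Dict.foldl_insert_getD_add_one_eq_counter,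
    PySem.Dict.contains_counter]
  rfl

-- ===== VERDICT (by name: the statement is the Claim_ definition above) =====
theorem stat_one_pred_spec : Claim_equal_stat_one_pred := by
  intro stats good label _ _
  unfold Spec_stat_one_pred
  exact pv_main stats good label
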